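-- pv_equiv track=rewrite | github.com/IterUp/advent-of-code | 2023/day21/main2.py | get_cells_for_distance
-- ===== SOURCE A (Python) =====
-- def get_neighbour_coords(lines, row, col):
--     if (row > 0) and (lines[row - 1][col] != "#"):
--         yield (row - 1, col)
--     if (row + 1 < len(lines)) and (lines[row + 1][col] != "#"):
--         yield (row + 1, col)
--     if (col > 0) and (lines[row][col - 1] != "#"):
--         yield (row, col - 1)
--     if (col + 1 < len(lines[0])) and (lines[row][col + 1] != "#"):
--         yield (row, col + 1)
--
-- def get_cells_for_distance(garden, start_row, start_col):
--     visited = set()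
--     next_cells = [(start_row, start_col)]
--     visited.add(next_cells[0])
--     cells_for_distance = [0, 0]
--
--     while next_cells:
--         cells = next_cells
--         cells_for_distance.append(len(next_cells) + cells_for_distance[-2])
--         next_cells = []
--         for cell in cells:
--             for n in get_neighbour_coords(garden, *cell):
--                 if n not in visited:
--                     visited.add(n)
--                     next_cells.append(n)
--
--     return cells_for_distance[1:]
-- ===== SOURCE B (Python) =====
-- def _neighbours(garden, row, col):
--     result = []
--     if row > 0 and garden[row - 1][col] != "#":
--         result.append((row - 1, col))
--     if row + 1 < len(garden) and garden[row + 1][col] != "#":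
--         result.append((row + 1, col))
--     if col > 0 and garden[row][col - 1] != "#":
--         result.append((row, col - 1))
--     if col + 1 < len(garden[0]) and garden[row][col + 1] != "#":
--         result.append((row, col + 1))
--     return result
--
-- def get_cells_for_distance(garden, start_row, start_col):
--     # single-queue BFS recording every cell's distance, then a counting pass
--     # and a parity-cumulative pass over the distance histogram
--     dist = {(start_row, start_col): 0}
--     queue = [(start_row, start_col)]
--     i = 0
--     while i < len(queue):
--         cell = queue[i]
--         i += 1
--         d = dist[cell]
--         for n in _neighbours(garden, cell[0], cell[1]):
--             if n not in dist:
--                 dist[n] = d + 1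
--                 queue.append(n)
--     counts = {}
--     for v in dist.values():
--         counts[v] = counts.get(v, 0) + 1
--     max_d = max(dist.values())
--     out = [0]
--     for dd in range(max_d + 1):
--         out.append(counts.get(dd, 0) + (out[dd - 1] if dd >= 1 else 0))
--     return out
-- ===== Notes on version B (the rewrite author's own statement) =====
-- stated objective: alternative
-- what changed: A runs a level-synchronous BFS (whole-frontier lists plus a visited set) and interleaves the parity-cumulative bookkeeping into the loop via cells_for_distance[-2]; B runs a plain single-queue BFS recording each cell's distance in a dict, then builds the distance histogram in a counting pass and the parity-cumulative output list in a separate final pass.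
-- outside the precondition, e.g. on get_cells_for_distance(['.'], -2, 0): A returns [0, 1, 1, 2], B returns [0, 1, 1, 2]; on get_cells_for_distance([' ', '##ab'], -2, 1): A returns [0, 1, 1], B returns [0, 1, 1]
import Mathlib
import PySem

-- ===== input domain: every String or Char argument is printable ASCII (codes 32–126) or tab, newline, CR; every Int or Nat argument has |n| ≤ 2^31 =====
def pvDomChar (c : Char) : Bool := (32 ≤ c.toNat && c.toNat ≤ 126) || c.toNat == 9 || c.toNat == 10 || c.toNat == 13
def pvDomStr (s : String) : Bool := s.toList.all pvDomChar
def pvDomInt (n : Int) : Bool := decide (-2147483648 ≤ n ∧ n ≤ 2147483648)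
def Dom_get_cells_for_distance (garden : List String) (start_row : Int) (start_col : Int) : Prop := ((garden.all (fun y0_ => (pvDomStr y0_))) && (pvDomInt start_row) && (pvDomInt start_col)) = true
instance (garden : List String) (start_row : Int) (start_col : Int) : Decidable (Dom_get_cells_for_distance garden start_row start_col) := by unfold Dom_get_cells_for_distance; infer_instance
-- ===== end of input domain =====

-- B replaces A's level-synchronous BFS with inline parity-cumulative bookkeeping by a
-- single-queue BFS recording distances, a histogram pass and a separate cumulative pass
-- (objective: alternative decomposition, same asymptotic cost).

-- ===== PORT A =====

-- len(garden[0]) — Python raises IndexError on an empty garden (excluded by Pre_)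
def pvWidth (garden : List String) : Int :=
  match garden with
  | [] => 0
  | s :: _ => PySem.Str.len s

-- garden[r][c] as an Option; `none` = IndexError (never hit inside Pre_, where all
-- accesses made by get_neighbour_coords are in range)
def pvAt (garden : List String) (r c : Int) : Option Char :=
  (PySem.List.pyGet? garden r).bind (fun s => PySem.Str.pyGet? s c)

-- get_neighbour_coords(lines, row, col): the four guarded yields, in order
def pvNeighbours (garden : List String) (row col : Int) : List (Int × Int) :=
  (if 0 < row ∧ ¬ pvAt garden (row - 1) col = some '#' then [(row - 1, col)] else []) ++
  (if row + 1 < (garden.length : Int) ∧ ¬ pvAt garden (row + 1) col = some '#' then [(row + 1, col)] else []) ++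
  (if 0 < col ∧ ¬ pvAt garden row (col - 1) = some '#' then [(row, col - 1)] else []) ++
  (if col + 1 < pvWidth garden ∧ ¬ pvAt garden row (col + 1) = some '#' then [(row, col + 1)] else [])

-- body of A's inner `if n not in visited: visited.add(n); next_cells.append(n)`
def pvInner (st : PySem.Set (Int × Int) × List (Int × Int)) (n : Int × Int) :
    PySem.Set (Int × Int) × List (Int × Int) :=
  if PySem.Set.contains st.1 n then st else (PySem.Set.add st.1 n, st.2 ++ [n])

-- A's `for n in get_neighbour_coords(garden, *cell)` loop for one cell
def pvStepA (garden : List String) (st : PySem.Set (Int × Int) × List (Int × Int))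
    (cell : Int × Int) : PySem.Set (Int × Int) × List (Int × Int) :=
  (pvNeighbours garden cell.1 cell.2).foldl pvInner st

-- A's while loop; fuel only makes the recursion structural (the loop runs at most once
-- per distinct visited cell, and inside Pre_ every visited cell lies in the grid)
def pvLoopA (garden : List String) :
    Nat → PySem.Set (Int × Int) → List (Int × Int) → List Int → List Int
  | 0, _, _, cfd => cfd
  | fuel + 1, visited, next_cells, cfd =>
    if next_cells = [] then cfd
    else
      let cfd' := cfd ++ [(next_cells.length : Int) + (PySem.List.pyGet? cfd (-2)).getD 0]
      let st := next_cells.foldl (pvStepA garden) (visited, ([] : List (Int × Int)))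
      pvLoopA garden fuel st.1 st.2 cfd'

def get_cells_for_distance (garden : List String) (start_row : Int) (start_col : Int) : List Int :=
  let visited : PySem.Set (Int × Int) := PySem.Set.add PySem.Set.empty (start_row, start_col)
  let cfd := pvLoopA garden
      ((garden.length + start_row.natAbs + 1) * ((pvWidth garden).toNat + start_col.natAbs + 1) + 2)
      visited [(start_row, start_col)] [0, 0]
  PySem.List.slice cfd (some 1) none   -- cells_for_distance[1:]

-- ===== PORT B =====

-- body of B's inner `if n not in dist: dist[n] = d + 1; queue.append(n)`
def pvStepB (d : Int) (st : PySem.Dict (Int × Int) Int × List (Int × Int)) (n : Int × Int) :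
    PySem.Dict (Int × Int) Int × List (Int × Int) :=
  if PySem.Dict.contains st.1 n then st else (PySem.Dict.insert st.1 n (d + 1), st.2 ++ [n])

-- B's `while i < len(queue)` loop; fuel only makes the recursion structural (one unit
-- per processed queue entry; inside Pre_ the queue holds distinct in-grid cells)
def pvLoopB (garden : List String) :
    Nat → PySem.Dict (Int × Int) Int → List (Int × Int) → Nat → PySem.Dict (Int × Int) Int
  | 0, dist, _, _ => dist
  | fuel + 1, dist, queue, i =>
    if i < queue.length then
      let cell := queue[i]!
      -- dist[cell]; the key is always present (every queued cell was inserted)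
      let st := (pvNeighbours garden cell.1 cell.2).foldl
          (pvStepB (PySem.Dict.getD dist cell 0)) (dist, queue)
      pvLoopB garden fuel st.1 st.2 (i + 1)
    else dist

-- B's counting loop `for v in dist.values(): counts[v] = counts.get(v, 0) + 1`
def pvCounts (vals : List Int) : PySem.Dict Int Int :=
  vals.foldl (fun c v => PySem.Dict.insert c v (PySem.Dict.getD c v 0 + 1)) PySem.Dict.empty

-- body of B's cumulative loop `out.append(counts.get(dd, 0) + (out[dd-1] if dd >= 1 else 0))`
def pvCumStep (counts : PySem.Dict Int Int) (out : List Int) (dd : Int) : List Int :=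
  out ++ [PySem.Dict.getD counts dd 0 +
    (if 1 ≤ dd then (PySem.List.pyGet? out (dd - 1)).getD 0 else 0)]

def get_cells_for_distance_alt (garden : List String) (start_row : Int) (start_col : Int) : List Int :=
  let dist0 : PySem.Dict (Int × Int) Int :=
    PySem.Dict.insert PySem.Dict.empty (start_row, start_col) 0
  let dist := pvLoopB garden
      ((garden.length + start_row.natAbs + 1) * ((pvWidth garden).toNat + start_col.natAbs + 1) + 1)
      dist0 [(start_row, start_col)] 0
  let vals := PySem.Dict.values dist
  let counts := pvCounts vals
  -- max(dist.values()); dist is never empty, so the default is never used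
  let maxd := (PySem.List.max? vals (fun v => v)).getD 0
  (PySem.List.pyRange 0 (maxd + 1)).foldl (pvCumStep counts) [0]

-- ===== PRECONDITION & SPEC =====

-- Pre_ = the inputs on which A is guaranteed to return: a nonempty garden whose rows
-- are all at least as long as row 0 and a start index pair Python accepts for every
-- row (including negative wraparound indices, -R <= row < R, -len(row) <= col < W).
-- Outside Pre_ A raises IndexError on some BFS access, except for accidental
-- combinations of row lengths / far-out starts that dodge every failing access.
def Pre_get_cells_for_distance (garden : List String) (start_row : Int) (start_col : Int) : Prop :=
  garden ≠ [] ∧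
  (∀ s ∈ garden, pvWidth garden ≤ PySem.Str.len s ∧ -(PySem.Str.len s) ≤ start_col) ∧
  -(garden.length : Int) ≤ start_row ∧ start_row < (garden.length : Int) ∧
  start_col < pvWidth garden

instance (garden : List String) (start_row : Int) (start_col : Int) :
    Decidable (Pre_get_cells_for_distance garden start_row start_col) := by
  unfold Pre_get_cells_for_distance; infer_instance

def pvWitness_get_cells_for_distance : List String × Int × Int := (["..", ".#"], 0, 0)

def Spec_get_cells_for_distance (garden : List String) (start_row : Int) (start_col : Int) (out : List Int) : Prop := out = get_cells_for_distance_alt garden start_row start_col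
instance (garden : List String) (start_row : Int) (start_col : Int) (out : List Int) : Decidable (Spec_get_cells_for_distance garden start_row start_col out) := by unfold Spec_get_cells_for_distance; infer_instance

-- ===== CLAIM (what is proved, stated in full; the proofs are below) =====
def Claim_equal_get_cells_for_distance : Prop := ∀ (garden : List String) (start_row : Int) (start_col : Int), Dom_get_cells_for_distance garden start_row start_col → Pre_get_cells_for_distance garden start_row start_col → Spec_get_cells_for_distance garden start_row start_col (get_cells_for_distance garden start_row start_col)

-- ===== LEMMAS AND PROOFS =====

-- the list of cells a fold of pvInner (freshness test + append) adds to `v`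
def pvDelta (v : List (Int × Int)) : List (Int × Int) → List (Int × Int)
  | [] => []
  | n :: ns => if n ∈ v then pvDelta v ns else n :: pvDelta (v ++ [n]) ns

def pvNbrs (g : List String) (c : Int × Int) : List (Int × Int) := pvNeighbours g c.1 c.2

-- cells discovered when expanding one whole BFS level `nc` from visited set `v`
def pvExpand (g : List String) (v nc : List (Int × Int)) : List (Int × Int) :=
  pvDelta v (nc.flatMap (pvNbrs g))

-- the sequence of BFS levels (A's successive `next_cells`), cut off by fuel like pvLoopA
def pvFronts (g : List String) : Nat → List (Int × Int) → List (Int × Int) → List (List (Int × Int))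
  | 0, _, _ => []
  | f + 1, v, nc =>
    if nc = [] then [] else nc :: pvFronts g f (v ++ pvExpand g v nc) (pvExpand g v nc)

-- "the BFS finishes within f levels"
def pvDone (g : List String) : Nat → List (Int × Int) → List (Int × Int) → Prop
  | 0, _, nc => nc = []
  | f + 1, v, nc => nc = [] ∨ pvDone g f (v ++ pvExpand g v nc) (pvExpand g v nc)

-- levels tagged with their distances, starting at d
def pvTag : List (List (Int × Int)) → Int → List ((Int × Int) × Int)
  | [], _ => []
  | L :: Ls, d => L.map (fun x => (x, d)) ++ pvTag Ls (d + 1)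

def pvSumLen (Ls : List (List (Int × Int))) : Nat := (Ls.map List.length).sum

-- A's cells_for_distance list as a function of the level sizes
def pvC (sizes : List Int) : List Int :=
  sizes.foldl (fun c s => c ++ [s + (PySem.List.pyGet? c (-2)).getD 0]) [0, 0]

def pvInGrid (g : List String) (lo1 lo2 : Int) (c : Int × Int) : Prop :=
  lo1 ≤ c.1 ∧ c.1 < (g.length : Int) ∧ lo2 ≤ c.2 ∧ c.2 < pvWidth g

lemma pv_foldl_inner (ns : List (Int × Int)) :
    ∀ (v : PySem.Set (Int × Int)) (acc : List (Int × Int)),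
    ns.foldl pvInner (v, acc) = (v ++ pvDelta v ns, acc ++ pvDelta v ns) := by
  induction ns with
  | nil => intro v acc; simp [pvDelta]
  | cons n ns ih =>
    intro v acc
    by_cases h : n ∈ v
    · have hc : PySem.Set.contains v n = true := (PySem.Set.contains_iff v n).mpr h
      simp only [List.foldl_cons, pvInner, hc, if_true, pvDelta, h]
      exact ih v acc
    · have hc : PySem.Set.contains v n = false := by
        rw [← Bool.not_eq_true]; simp [h]
      simp only [List.foldl_cons, pvInner, hc, Bool.false_eq_true, if_false, pvDelta, h]
      rw [PySem.Set.add_of_not_mem h, ih (v ++ [n]) (acc ++ [n])]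
      simp

lemma pv_delta_sub (ns : List (Int × Int)) :
    ∀ v, ∀ x ∈ pvDelta v ns, x ∈ ns ∧ x ∉ v := by
  induction ns with
  | nil => intro v x hx; simp [pvDelta] at hx
  | cons n ns ih =>
    intro v x hx
    by_cases h : n ∈ v
    · simp only [pvDelta, h, ite_true] at hx
      rcases ih v x hx with ⟨h1, h2⟩
      exact ⟨List.mem_cons_of_mem _ h1, h2⟩
    · simp only [pvDelta, h, ite_false] at hx
      rcases List.mem_cons.mp hx with rfl | hx
      · exact ⟨List.mem_cons_self, h⟩
      · rcases ih (v ++ [n]) x hx with ⟨h1, h2⟩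
        simp only [List.mem_append, List.mem_singleton, not_or] at h2
        exact ⟨List.mem_cons_of_mem _ h1, h2.1⟩

lemma pv_delta_nodup (ns : List (Int × Int)) :
    ∀ v, v.Nodup → (v ++ pvDelta v ns).Nodup := by
  induction ns with
  | nil => intro v hv; simpa [pvDelta] using hv
  | cons n ns ih =>
    intro v hv
    by_cases h : n ∈ v
    · simpa [pvDelta, h] using ih v hv
    · have h2 : (v ++ [n]).Nodup := by
        refine List.Nodup.append hv (List.nodup_singleton n) ?_
        intro a ha hb
        rw [List.mem_singleton] at hb
        exact h (hb ▸ ha)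
      have := ih (v ++ [n]) h2
      simpa [pvDelta, h, List.append_assoc] using this

lemma pv_delta_append (ns₁ ns₂ : List (Int × Int)) :
    ∀ v, pvDelta v (ns₁ ++ ns₂) = pvDelta v ns₁ ++ pvDelta (v ++ pvDelta v ns₁) ns₂ := by
  induction ns₁ with
  | nil => intro v; simp [pvDelta]
  | cons n ns ih =>
    intro v
    by_cases h : n ∈ v
    · simp [pvDelta, h, ih v]
    · simp [pvDelta, h, ih (v ++ [n]), List.append_assoc]

lemma pv_foldl_stepA (g : List String) (cells : List (Int × Int)) :
    ∀ (v : PySem.Set (Int × Int)) (acc : List (Int × Int)),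
    cells.foldl (pvStepA g) (v, acc)
      = (v ++ pvDelta v (cells.flatMap (pvNbrs g)), acc ++ pvDelta v (cells.flatMap (pvNbrs g))) := by
  induction cells with
  | nil => intro v acc; simp [pvDelta]
  | cons c cs ih =>
    intro v acc
    simp only [List.foldl_cons]
    have hstep : pvStepA g (v, acc) c = (v ++ pvDelta v (pvNbrs g c), acc ++ pvDelta v (pvNbrs g c)) := by
      simpa [pvStepA, pvNbrs] using pv_foldl_inner (pvNbrs g c) v acc
    rw [hstep, ih]
    simp [List.flatMap_cons, pv_delta_append, List.append_assoc]

lemma pv_loopA_char (g : List String) : ∀ (f : Nat) (v : PySem.Set (Int × Int))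
    (nc : List (Int × Int)) (cfd : List Int),
    pvLoopA g f v nc cfd
      = (pvFronts g f v nc).foldl
          (fun c L => c ++ [((L.length : Int)) + (PySem.List.pyGet? c (-2)).getD 0]) cfd := by
  intro f
  induction f with
  | zero => intro v nc cfd; simp [pvLoopA, pvFronts]
  | succ f ih =>
    intro v nc cfd
    cases nc with
    | nil => simp [pvLoopA, pvFronts]
    | cons c cs =>
      have hne : (c :: cs : List (Int × Int)) ≠ [] := by simp
      rw [pvLoopA, if_neg hne, pvFronts, if_neg hne]
      simp only
      rw [pv_foldl_stepA, ih]
      rfl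

lemma pv_get?_mk_append_left {l₁ l₂ : List ((Int × Int) × Int)} {k : Int × Int}
    (h : k ∈ l₁.map Prod.fst) :
    (PySem.Dict.mk (l₁ ++ l₂)).get? k = (PySem.Dict.mk l₁).get? k := by
  simp only [PySem.Dict.get?, List.find?_append]
  obtain ⟨p, hp, hpk⟩ : ∃ p ∈ l₁, p.1 = k := by
    simpa using h
  have hs : (l₁.find? (fun p => p.1 == k)).isSome := by
    rw [List.find?_isSome]
    exact ⟨p, hp, by simp [hpk]⟩
  cases hfind : l₁.find? (fun p => p.1 == k) with
  | none => rw [hfind] at hs; simp at hs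
  | some q => rfl

lemma pv_get?_mk_append_right {l₁ l₂ : List ((Int × Int) × Int)} {k : Int × Int}
    (h : k ∉ l₁.map Prod.fst) :
    (PySem.Dict.mk (l₁ ++ l₂)).get? k = (PySem.Dict.mk l₂).get? k := by
  simp only [PySem.Dict.get?, List.find?_append]
  have hn : l₁.find? (fun p => p.1 == k) = none := by
    rw [List.find?_eq_none]
    intro p hp
    simp only [beq_iff_eq]
    intro hpk
    exact h (List.mem_map.mpr ⟨p, hp, hpk⟩)
  rw [hn]
  rfl

lemma pv_get?_map_const {l : List (Int × Int)} {k : Int × Int} (w : Int) (h : k ∈ l) :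
    (PySem.Dict.mk (l.map (fun x => (x, w)))).get? k = some w := by
  induction l with
  | nil => cases h
  | cons x l ih =>
    by_cases hx : x = k
    · simp [PySem.Dict.get?, hx]
    · rcases List.mem_cons.mp h with rfl | h2
      · exact absurd rfl hx
      · have hb : ((x, w).1 == k) = false := by simp [hx]
        simpa [PySem.Dict.get?, List.find?_cons, hb] using ih h2

lemma pv_foldl_stepB (ns : List (Int × Int)) :
    ∀ (dist : PySem.Dict (Int × Int) Int) (q : List (Int × Int)) (d : Int),
    ns.foldl (pvStepB d) (dist, q)
      = (PySem.Dict.mk (dist.items ++ (pvDelta dist.keys ns).map (fun x => (x, d + 1))),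
         q ++ pvDelta dist.keys ns) := by
  induction ns with
  | nil => intro dist q d; simp [pvDelta]
  | cons n ns ih =>
    intro dist q d
    by_cases h : n ∈ dist.keys
    · have hc : PySem.Dict.contains dist n = true := (PySem.Dict.contains_iff_mem_keys dist n).mpr h
      simp only [List.foldl_cons, pvStepB, hc, if_true, pvDelta, h]
      exact ih dist q d
    · have hc : PySem.Dict.contains dist n = false := by
        rw [← Bool.not_eq_true]; simp [PySem.Dict.contains_iff_mem_keys, h]
      simp only [List.foldl_cons, pvStepB, hc, Bool.false_eq_true, if_false, pvDelta, h]
      rw [ih (dist.insert n (d + 1)) (q ++ [n]) d]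
      have hitems : (dist.insert n (d + 1)).items = dist.items ++ [(n, d + 1)] :=
        PySem.Dict.items_insert_of_not_contains dist (d + 1) hc
      have hkeys : (dist.insert n (d + 1)).keys = dist.keys ++ [n] := by
        simp [PySem.Dict.keys, hitems]
      rw [hitems, hkeys]
      simp [List.append_assoc]

lemma pv_exitB (g : List String) : ∀ (f : Nat) (dist : PySem.Dict (Int × Int) Int)
    (q : List (Int × Int)) (i : Nat), q.length ≤ i → pvLoopB g f dist q i = dist := by
  intro f dist q i hle
  cases f with
  | zero => rfl
  | succ f => rw [pvLoopB, if_neg (by omega)]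

lemma pv_chunk (g : List String) (cells : List (Int × Int)) :
    ∀ (done tail : List (Int × Int)) (dist : PySem.Dict (Int × Int) Int) (d : Int) (f : Nat),
    dist.keys = done ++ cells ++ tail →
    (done ++ cells ++ tail).Nodup →
    (∀ c ∈ cells, dist.getD c 0 = d) →
    pvLoopB g (cells.length + f) dist (done ++ cells ++ tail) done.length
      = pvLoopB g f
          (PySem.Dict.mk (dist.items ++
            (pvDelta (done ++ cells ++ tail) (cells.flatMap (pvNbrs g))).map (fun x => (x, d + 1))))
          ((done ++ cells ++ tail) ++ pvDelta (done ++ cells ++ tail) (cells.flatMap (pvNbrs g)))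
          (done.length + cells.length) := by
  induction cells with
  | nil =>
    intro done tail dist d f hkeys hnd hval
    simp only [List.length_nil, Nat.add_zero, Nat.zero_add, List.flatMap_nil, pvDelta,
      List.map_nil, List.append_nil]
  | cons c cs ih =>
    intro done tail dist d f hkeys hnd hval
    have hlen : (c :: cs : List (Int × Int)).length + f = (cs.length + f) + 1 := by
      simp only [List.length_cons]; omega
    have hql : done.length < ((done ++ c :: cs) ++ tail).length := by
      simp only [List.length_append, List.length_cons]; omega
    have hget0 : ((done ++ c :: cs) ++ tail)[done.length]'hql = c :=
      List.getElem_of_append (l₂ := cs ++ tail) (by simp) rfl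
    have hget : ((done ++ c :: cs) ++ tail)[done.length]! = c := by
      rw [List.getElem!_eq_getElem?_getD, List.getElem?_eq_getElem hql, hget0]
      rfl
    rw [hlen, pvLoopB, if_pos hql, hget]
    show pvLoopB g (cs.length + f)
        ((pvNeighbours g c.1 c.2).foldl (pvStepB (dist.getD c 0)) (dist, (done ++ c :: cs) ++ tail)).1
        ((pvNeighbours g c.1 c.2).foldl (pvStepB (dist.getD c 0)) (dist, (done ++ c :: cs) ++ tail)).2
        (done.length + 1) = _
    rw [hval c List.mem_cons_self, pv_foldl_stepB, hkeys]
    dsimp only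
    -- names for the two waves of discovered cells
    set Δ₁ := pvDelta ((done ++ c :: cs) ++ tail) (pvNeighbours g c.1 c.2) with hΔ₁
    have hlist : ((done ++ c :: cs) ++ tail) ++ Δ₁ = (done ++ [c]) ++ cs ++ (tail ++ Δ₁) := by
      simp
    have hkeys1 : (PySem.Dict.mk (dist.items ++ Δ₁.map (fun x => (x, d + 1)))).keys
        = (done ++ [c]) ++ cs ++ (tail ++ Δ₁) := by
      simp only [PySem.Dict.keys, List.map_append, List.map_map]
      have hfst : (Prod.fst ∘ fun x : Int × Int => (x, d + 1)) = id := rfl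
      rw [hfst, List.map_id]
      have : dist.items.map (fun x => x.1) = dist.keys := rfl
      rw [this, hkeys, ← hlist]
    have hnd1 : ((done ++ [c]) ++ cs ++ (tail ++ Δ₁)).Nodup := by
      rw [← hlist]
      exact pv_delta_nodup _ _ hnd
    have hval1 : ∀ c' ∈ cs, (PySem.Dict.mk (dist.items ++ Δ₁.map (fun x => (x, d + 1)))).getD c' 0 = d := by
      intro c' hc'
      have hmem : c' ∈ dist.items.map Prod.fst := by
        have : dist.items.map Prod.fst = dist.keys := rfl
        rw [this, hkeys]
        exact List.mem_append_left _ (List.mem_append_right _ (List.mem_cons_of_mem _ hc'))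
      simp only [PySem.Dict.getD]
      rw [pv_get?_mk_append_left hmem]
      exact hval c' (List.mem_cons_of_mem _ hc')
    have hIH := ih (done ++ [c]) (tail ++ Δ₁)
        (PySem.Dict.mk (dist.items ++ Δ₁.map (fun x => (x, d + 1)))) d f hkeys1 hnd1 hval1
    have hi1 : done.length + 1 = (done ++ [c]).length := by simp
    rw [hlist, hi1, hIH]
    -- both sides are the same pvLoopB call
    have hsplit : pvDelta ((done ++ c :: cs) ++ tail) ((c :: cs).flatMap (pvNbrs g))
        = Δ₁ ++ pvDelta (((done ++ c :: cs) ++ tail) ++ Δ₁) (cs.flatMap (pvNbrs g)) := by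
      rw [List.flatMap_cons, pv_delta_append]
      rfl
    have hΔ₂ : pvDelta ((done ++ [c]) ++ cs ++ (tail ++ Δ₁)) (cs.flatMap (pvNbrs g))
        = pvDelta (((done ++ c :: cs) ++ tail) ++ Δ₁) (cs.flatMap (pvNbrs g)) := by
      rw [hlist]
    rw [hΔ₂, hsplit]
    congr 1
    · simp
    · simp
    · simp [List.length_append]
      omega

lemma pv_fronts_nil (g : List String) : ∀ (f : Nat) (v : List (Int × Int)),
    pvFronts g f v [] = [] := by
  intro f v
  cases f <;> simp [pvFronts]

lemma pv_sim (g : List String) : ∀ (f : Nat) (done nc : List (Int × Int))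
    (dist : PySem.Dict (Int × Int) Int) (d : Int),
    dist.keys = done ++ nc → (done ++ nc).Nodup → (∀ c ∈ nc, dist.getD c 0 = d) →
    pvDone g f (done ++ nc) nc →
    ∀ slack, pvLoopB g (pvSumLen (pvFronts g f (done ++ nc) nc) + slack) dist (done ++ nc) done.length
      = PySem.Dict.mk (dist.items ++ pvTag ((pvFronts g f (done ++ nc) nc).drop 1) (d + 1)) := by
  intro f
  induction f with
  | zero =>
    intro done nc dist d hkeys hnd hval hdone slack
    have hnc : nc = [] := hdone
    subst hnc
    rw [pvFronts]
    have h0 : pvSumLen ([] : List (List (Int × Int))) = 0 := rfl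
    rw [h0, Nat.zero_add, pv_exitB g slack dist (done ++ []) done.length (by simp)]
    simp [pvTag]
  | succ f ih =>
    intro done nc dist d hkeys hnd hval hdone slack
    by_cases hnc : nc = []
    · subst hnc
      rw [pvFronts, if_pos rfl]
      have h0 : pvSumLen ([] : List (List (Int × Int))) = 0 := rfl
      rw [h0, Nat.zero_add, pv_exitB g slack dist (done ++ []) done.length (by simp)]
      simp [pvTag]
    · rw [pvFronts, if_neg hnc]
      have hdone' : pvDone g f ((done ++ nc) ++ pvExpand g (done ++ nc) nc)
          (pvExpand g (done ++ nc) nc) := by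
        rcases hdone with h | h
        · exact absurd h hnc
        · exact h
      have hkeys0 : dist.keys = done ++ nc ++ [] := by rw [hkeys, List.append_nil]
      have hnd0 : (done ++ nc ++ []).Nodup := by rwa [List.append_nil]
      have hchunk := pv_chunk g nc done [] dist d
        (pvSumLen (pvFronts g f ((done ++ nc) ++ pvExpand g (done ++ nc) nc)
          (pvExpand g (done ++ nc) nc)) + slack) hkeys0 hnd0 hval
      rw [List.append_nil] at hchunk
      have hfuel : pvSumLen (nc :: pvFronts g f ((done ++ nc) ++ pvExpand g (done ++ nc) nc)
            (pvExpand g (done ++ nc) nc)) + slack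
          = nc.length + (pvSumLen (pvFronts g f ((done ++ nc) ++ pvExpand g (done ++ nc) nc)
            (pvExpand g (done ++ nc) nc)) + slack) := by
        simp only [pvSumLen, List.map_cons, List.sum_cons]
        omega
      rw [hfuel, hchunk]
      set E := pvExpand g (done ++ nc) nc with hE
      have hEd : pvDelta (done ++ nc) (nc.flatMap (pvNbrs g)) = E := rfl
      rw [hEd]
      set dist1 := PySem.Dict.mk (dist.items ++ E.map (fun x => (x, d + 1))) with hdist1
      have hkeys1 : dist1.keys = (done ++ nc) ++ E := by
        simp only [hdist1, PySem.Dict.keys, List.map_append, List.map_map]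
        have hfst : (Prod.fst ∘ fun x : Int × Int => (x, d + 1)) = id := rfl
        rw [hfst, List.map_id]
        have hk : dist.items.map (fun x => x.1) = dist.keys := rfl
        rw [hk, hkeys]
      have hnd1 : ((done ++ nc) ++ E).Nodup := pv_delta_nodup _ _ hnd
      have hval1 : ∀ c ∈ E, dist1.getD c 0 = d + 1 := by
        intro c hc
        have hnot : c ∉ dist.items.map Prod.fst := by
          have hk : dist.items.map Prod.fst = dist.keys := rfl
          rw [hk, hkeys]
          exact (pv_delta_sub _ _ c hc).2
        simp only [hdist1, PySem.Dict.getD]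
        rw [pv_get?_mk_append_right hnot, pv_get?_map_const _ hc]
        rfl
      have hi : done.length + nc.length = (done ++ nc).length := (List.length_append).symm
      rw [hi]
      have hIH := ih (done ++ nc) E dist1 (d + 1) hkeys1 hnd1 hval1 hdone' slack
      rw [hIH]
      by_cases hE0 : E = []
      · rw [hE0, pv_fronts_nil]
        simp [hdist1, hE0, pvTag]
      · cases f with
        | zero => exact absurd hdone' hE0
        | succ f2 =>
          rw [pvFronts, if_neg hE0]
          simp only [List.drop_succ_cons, List.drop_zero]
          rw [pvTag]
          simp [hdist1, List.append_assoc]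

lemma pv_nbrs_grid (g : List String) {lo1 lo2 : Int} (hlo1 : lo1 ≤ 0) (hlo2 : lo2 ≤ 0)
    (c : Int × Int) (hc : pvInGrid g lo1 lo2 c) :
    ∀ n ∈ pvNbrs g c, pvInGrid g lo1 lo2 n := by
  intro n hn
  obtain ⟨h1, h2, h3, h4⟩ := hc
  simp only [pvNbrs, pvNeighbours, List.mem_append] at hn
  rcases hn with ((hn | hn) | hn) | hn <;>
    rw [List.mem_ite_nil_right] at hn <;> obtain ⟨⟨hg, -⟩, hn⟩ := hn <;>
    rw [List.mem_singleton] at hn <;> subst hn <;> simp only [pvInGrid]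
  · exact ⟨by omega, by omega, h3, h4⟩
  · exact ⟨by omega, hg, h3, h4⟩
  · exact ⟨h1, h2, by omega, by omega⟩
  · exact ⟨h1, h2, by omega, hg⟩

lemma pv_expand_grid (g : List String) {lo1 lo2 : Int} (hlo1 : lo1 ≤ 0) (hlo2 : lo2 ≤ 0)
    (v nc : List (Int × Int))
    (h : ∀ c ∈ nc, pvInGrid g lo1 lo2 c) : ∀ x ∈ pvExpand g v nc, pvInGrid g lo1 lo2 x := by
  intro x hx
  obtain ⟨hmem, -⟩ := pv_delta_sub _ _ x hx
  obtain ⟨c, hc, hxc⟩ := List.mem_flatMap.mp hmem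
  exact pv_nbrs_grid g hlo1 hlo2 c (h c hc) x hxc

lemma pv_length_le_grid (g : List String) {lo1 lo2 : Int} (v : List (Int × Int)) (hnd : v.Nodup)
    (hg : ∀ c ∈ v, pvInGrid g lo1 lo2 c) :
    v.length ≤ ((g.length : Int) - lo1).toNat * (pvWidth g - lo2).toNat := by
  classical
  have hsub : v.toFinset ⊆ (Finset.Ico lo1 (g.length : Int)) ×ˢ (Finset.Ico lo2 (pvWidth g)) := by
    intro c hcv
    rw [List.mem_toFinset] at hcv
    obtain ⟨a, b, hcc, hd⟩ := hg c hcv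
    rw [Finset.mem_product, Finset.mem_Ico, Finset.mem_Ico]
    exact ⟨⟨a, b⟩, ⟨hcc, hd⟩⟩
  have h1 : v.toFinset.card = v.length := List.toFinset_card_of_nodup hnd
  have h2 := Finset.card_le_card hsub
  rw [Finset.card_product, Int.card_Ico, Int.card_Ico] at h2
  omega

lemma pv_done_nil (g : List String) (f : Nat) (v : List (Int × Int)) : pvDone g f v [] := by
  cases f <;> simp [pvDone]

lemma pv_done_fuel (g : List String) {lo1 lo2 : Int} (hlo1 : lo1 ≤ 0) (hlo2 : lo2 ≤ 0) :
    ∀ (f : Nat) (v nc : List (Int × Int)),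
    v.Nodup → (∀ c ∈ v, pvInGrid g lo1 lo2 c) → nc ⊆ v →
    ((g.length : Int) - lo1).toNat * (pvWidth g - lo2).toNat + 1 ≤ f + v.length →
    pvDone g f v nc := by
  intro f
  induction f with
  | zero =>
    intro v nc hnd hg hsub hge
    exfalso
    have := pv_length_le_grid g v hnd hg
    omega
  | succ f ih =>
    intro v nc hnd hg hsub hge
    by_cases hnc : nc = []
    · exact Or.inl hnc
    · refine Or.inr ?_
      by_cases hE : pvExpand g v nc = []
      · rw [hE]
        exact pv_done_nil g f _
      · have hnd' : (v ++ pvExpand g v nc).Nodup := pv_delta_nodup _ v hnd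
        have hg' : ∀ c ∈ v ++ pvExpand g v nc, pvInGrid g lo1 lo2 c := by
          intro c hc
          rcases List.mem_append.mp hc with hc | hc
          · exact hg c hc
          · exact pv_expand_grid g hlo1 hlo2 v nc (fun x hx => hg x (hsub hx)) c hc
        have hlen : 0 < (pvExpand g v nc).length := List.length_pos_iff.mpr hE
        refine ih (v ++ pvExpand g v nc) (pvExpand g v nc) hnd' hg'
          (List.subset_append_right _ _) ?_
        rw [List.length_append]
        omega

lemma pv_sumLen_fronts (g : List String) {lo1 lo2 : Int} (hlo1 : lo1 ≤ 0) (hlo2 : lo2 ≤ 0) :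
    ∀ (f : Nat) (done nc : List (Int × Int)),
    (done ++ nc).Nodup → (∀ c ∈ done ++ nc, pvInGrid g lo1 lo2 c) →
    done.length + pvSumLen (pvFronts g f (done ++ nc) nc)
      ≤ ((g.length : Int) - lo1).toNat * (pvWidth g - lo2).toNat := by
  intro f
  induction f with
  | zero =>
    intro done nc hnd hg
    have := pv_length_le_grid g (done ++ nc) hnd hg
    rw [List.length_append] at this
    simp only [pvFronts, pvSumLen, List.map_nil, List.sum_nil]
    omega
  | succ f ih =>
    intro done nc hnd hg
    by_cases hnc : nc = []
    · have := pv_length_le_grid g (done ++ nc) hnd hg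
      rw [List.length_append] at this
      simp only [pvFronts, hnc, if_pos, pvSumLen, List.map_nil, List.sum_nil]
      omega
    · rw [pvFronts, if_neg hnc]
      have hnd' : ((done ++ nc) ++ pvExpand g (done ++ nc) nc).Nodup :=
        pv_delta_nodup _ (done ++ nc) hnd
      have hg' : ∀ c ∈ (done ++ nc) ++ pvExpand g (done ++ nc) nc, pvInGrid g lo1 lo2 c := by
        intro c hc
        rcases List.mem_append.mp hc with hc | hc
        · exact hg c hc
        · exact pv_expand_grid g hlo1 hlo2 (done ++ nc) nc
            (fun x hx => hg x (List.mem_append_right done hx)) c hc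
      have := ih (done ++ nc) (pvExpand g (done ++ nc) nc) hnd' hg'
      simp only [pvSumLen, List.map_cons, List.sum_cons] at this ⊢
      rw [List.length_append] at this
      omega

lemma pv_fronts_ne_nil (g : List String) : ∀ (f : Nat) (v nc : List (Int × Int)),
    ∀ L ∈ pvFronts g f v nc, L ≠ [] := by
  intro f
  induction f with
  | zero => intro v nc L hL; simp [pvFronts] at hL
  | succ f ih =>
    intro v nc L hL
    by_cases hnc : nc = []
    · rw [pvFronts, if_pos hnc] at hL
      cases hL
    · rw [pvFronts, if_neg hnc] at hL
      rcases List.mem_cons.mp hL with rfl | hL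
      · exact hnc
      · exact ih _ _ L hL

lemma pv_mem_tag_snd : ∀ (Ls : List (List (Int × Int))) (d : Int) (x : Int),
    x ∈ (pvTag Ls d).map Prod.snd → d ≤ x ∧ x < d + Ls.length := by
  intro Ls
  induction Ls with
  | nil => intro d x hx; simp [pvTag] at hx
  | cons L Ls ih =>
    intro d x hx
    simp only [pvTag, List.map_append, List.mem_append] at hx
    rcases hx with hx | hx
    · obtain ⟨p, hp, rfl⟩ := List.mem_map.mp hx
      obtain ⟨y, hy, rfl⟩ := List.mem_map.mp hp
      simp only [List.length_cons]
      exact ⟨le_refl d, by push_cast; omega⟩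
    · obtain ⟨h1, h2⟩ := ih (d + 1) x hx
      simp only [List.length_cons]
      push_cast
      omega

lemma pv_count_tag_lt : ∀ (Ls : List (List (Int × Int))) (d j : Int), j < d →
    ((pvTag Ls d).map Prod.snd).count j = 0 := by
  intro Ls
  induction Ls with
  | nil => intro d j hj; simp [pvTag]
  | cons L Ls ih =>
    intro d j hj
    simp only [pvTag, List.map_append, List.count_append]
    have h1 : ((L.map (fun x => (x, d))).map Prod.snd).count j = 0 := by
      rw [List.count_eq_zero]
      intro hmem
      simp only [List.map_map, List.mem_map] at hmem
      obtain ⟨y, -, hy⟩ := hmem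
      simp only [Function.comp] at hy
      omega
    rw [h1, ih (d + 1) j (by omega)]

lemma pv_count_tag_at : ∀ (Ls : List (List (Int × Int))) (d : Int) (k : Nat) (hk : k < Ls.length),
    ((pvTag Ls d).map Prod.snd).count (d + k) = (Ls[k]).length := by
  intro Ls
  induction Ls with
  | nil => intro d k hk; simp at hk
  | cons L Ls ih =>
    intro d k hk
    cases k with
    | zero =>
      simp only [pvTag, List.map_append, List.count_append, Nat.cast_zero, add_zero,
        List.getElem_cons_zero]
      have h1 : ((L.map (fun x => (x, d))).map Prod.snd).count d = L.length := by
        rw [List.map_map]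
        have : (Prod.snd ∘ fun x : Int × Int => (x, d)) = (fun _ : Int × Int => d) := rfl
        rw [this, List.map_const', List.count_replicate_self]
      rw [h1, pv_count_tag_lt Ls (d + 1) d (by omega)]
      omega
    | succ k' =>
      have hk' : k' < Ls.length := by simpa using hk
      simp only [pvTag, List.map_append, List.count_append, List.getElem_cons_succ]
      have h1 : ((L.map (fun x => (x, d))).map Prod.snd).count (d + (k' + 1 : Nat)) = 0 := by
        rw [List.count_eq_zero]
        intro hmem
        simp only [List.map_map, List.mem_map] at hmem
        obtain ⟨y, -, hy⟩ := hmem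
        simp only [Function.comp] at hy
        push_cast at hy
        omega
      rw [h1]
      have := ih (d + 1) k' hk'
      have harg : d + ((k' : Int) + 1) = (d + 1) + (k' : Int) := by omega
      push_cast
      push_cast at this
      rw [harg, this]
      omega

lemma pv_max?_isSome (xs : List Int) (h : xs ≠ []) :
    (PySem.List.max? xs (fun v => v)).isSome := by
  rw [← Option.ne_none_iff_isSome]
  intro hnone
  exact h ((PySem.List.max?_eq_none_iff _ _).mp hnone)

lemma pv_tag_mem_last : ∀ (Ls : List (List (Int × Int))) (d : Int), Ls ≠ [] →
    (∀ L ∈ Ls, L ≠ []) → (d + Ls.length - 1) ∈ (pvTag Ls d).map Prod.snd := by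
  intro Ls
  induction Ls with
  | nil => intro d h; exact absurd rfl h
  | cons L Ls ih =>
    intro d _ hall
    cases Ls with
    | nil =>
      obtain ⟨y, hy⟩ := List.exists_mem_of_ne_nil _ (hall L List.mem_cons_self)
      simp only [pvTag, List.map_append, List.mem_append]
      refine Or.inl ?_
      have hv : d + ((1 : Nat) : Int) - 1 = d := by push_cast; omega
      rw [List.length_cons, List.length_nil, hv]
      exact List.mem_map.mpr ⟨(y, d), List.mem_map.mpr ⟨y, hy, rfl⟩, rfl⟩
    | cons L₂ Ls₂ =>
      have hmem := ih (d + 1) (by simp) (fun L hL => hall L (List.mem_cons_of_mem _ hL))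
      have hv : d + (((L₂ :: Ls₂).length + 1 : Nat) : Int) - 1
          = (d + 1) + ((L₂ :: Ls₂).length : Int) - 1 := by push_cast; omega
      rw [List.length_cons, hv, pvTag, List.map_append]
      exact List.mem_append_right _ hmem

lemma pv_max_tag : ∀ (Ls : List (List (Int × Int))) (d : Int), Ls ≠ [] → (∀ L ∈ Ls, L ≠ []) →
    PySem.List.max? ((pvTag Ls d).map Prod.snd) (fun v => v) = some (d + Ls.length - 1) := by
  intro Ls d hne hall
  have hmem := pv_tag_mem_last Ls d hne hall
  have hvne : (pvTag Ls d).map Prod.snd ≠ [] := List.ne_nil_of_mem hmem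
  obtain ⟨m, hm⟩ := Option.isSome_iff_exists.mp (pv_max?_isSome _ hvne)
  have h1 := PySem.List.max?_mem hm
  have h2 := PySem.List.max?_isMax hm
  have hub := pv_mem_tag_snd Ls d m h1
  have h3 := h2 _ hmem
  rw [hm]
  congr 1
  simp only at h3
  omega

lemma pv_foldl_len : ∀ (sizes : List Int) (c : List Int),
    (sizes.foldl (fun c s => c ++ [s + (PySem.List.pyGet? c (-2)).getD 0]) c).length
      = c.length + sizes.length := by
  intro sizes
  induction sizes with
  | nil => intro c; simp
  | cons s sizes ih => intro c; rw [List.foldl_cons, ih]; simp; omega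

lemma pv_pyGet?_neg_two (l : List Int) (h : 2 ≤ l.length) :
    PySem.List.pyGet? l (-2) = l[l.length - 2]? := by
  have h0 : ¬ (0 : Int) ≤ -2 := by omega
  have h1 : -(l.length : Int) ≤ -2 := by omega
  rw [PySem.List.pyGet?, PySem.List.pyIdx?, if_neg h0, if_pos h1]
  rfl

lemma pv_C_length (sizes : List Int) : (pvC sizes).length = sizes.length + 2 := by
  rw [pvC, pv_foldl_len]
  simp
  omega

lemma pv_cum (counts : PySem.Dict Int Int) (sizes : List Int)
    (hc : ∀ (k : Nat) (hk : k < sizes.length), counts.getD (k : Int) 0 = sizes[k]) :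
    ∀ k : Nat, k ≤ sizes.length →
    (PySem.List.pyRange 0 (k : Int)).foldl (pvCumStep counts) [0]
      = (pvC (sizes.take k)).drop 1 := by
  intro k
  induction k with
  | zero =>
    intro hk
    rw [Nat.cast_zero, PySem.List.pyRange_one_eq_nil (le_refl 0)]
    simp [pvC]
  | succ k ih =>
    intro hk1
    have hk : k < sizes.length := by omega
    have hk' : k ≤ sizes.length := by omega
    have hr : PySem.List.pyRange 0 ((k + 1 : Nat) : Int) = PySem.List.pyRange 0 (k : Nat) ++ [((k : Nat) : Int)] := by
      push_cast
      exact PySem.List.pyRange_one_succ_right (by positivity)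
    rw [hr, List.foldl_append, ih hk']
    simp only [List.foldl_cons, List.foldl_nil, pvCumStep]
    have hlen_take : (sizes.take k).length = k := List.length_take_of_le hk'
    have hClen : (pvC (sizes.take k)).length = k + 2 := by rw [pv_C_length, hlen_take]
    have htake : sizes.take (k + 1) = sizes.take k ++ [sizes[k]] := by
      rw [List.take_add_one, List.getElem?_eq_getElem hk]
      rfl
    have hCstep : pvC (sizes.take (k + 1))
        = pvC (sizes.take k) ++ [sizes[k] + (PySem.List.pyGet? (pvC (sizes.take k)) (-2)).getD 0] := by
      rw [htake, pvC, List.foldl_append]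
      rfl
    have hdrop : (pvC (sizes.take (k + 1))).drop 1
        = (pvC (sizes.take k)).drop 1 ++ [sizes[k] + (PySem.List.pyGet? (pvC (sizes.take k)) (-2)).getD 0] := by
      rw [hCstep, List.drop_append_of_le_length (by omega)]
    rw [hdrop]
    -- the "previous same-parity" cell read by B equals A's cfd[-2]
    have hneg2 : PySem.List.pyGet? (pvC (sizes.take k)) (-2)
        = (pvC (sizes.take k))[k]? := by
      rw [pv_pyGet?_neg_two _ (by omega), hClen]
      norm_num
    have hifeq : (if (1 : Int) ≤ ((k : Nat) : Int) then
          (PySem.List.pyGet? ((pvC (sizes.take k)).drop 1) (((k : Nat) : Int) - 1)).getD 0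
        else 0)
        = (PySem.List.pyGet? (pvC (sizes.take k)) (-2)).getD 0 := by
      by_cases hk0 : k = 0
      · subst hk0
        rw [if_neg (by omega), hneg2]
        simp [pvC]
      · rw [if_pos (by omega)]
        have hcast : ((k : Nat) : Int) - 1 = ((k - 1 : Nat) : Int) := by
          omega
        rw [hcast, PySem.List.pyGet?_natCast, List.getElem?_drop, hneg2]
        have hidx : 1 + (k - 1) = k := by omega
        rw [hidx]
    rw [hc k hk, hifeq]

-- ===== VERDICT (by name: the statement is the Claim_ definition above) =====
theorem get_cells_for_distance_spec : Claim_equal_get_cells_for_distance := by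
  intro garden sr sc hdom hpre
  obtain ⟨hne, hrows, hr0, hr1, hc1⟩ := hpre
  unfold Spec_get_cells_for_distance
  simp only [get_cells_for_distance, get_cells_for_distance_alt]
  set N := (garden.length + sr.natAbs + 1) * ((pvWidth garden).toNat + sc.natAbs + 1) with hN
  set lo1 := min sr 0 with hlo1def
  set lo2 := min sc 0 with hlo2def
  have hlo1 : lo1 ≤ 0 := min_le_right _ _
  have hlo2 : lo2 ≤ 0 := min_le_right _ _
  have hW0 : 0 ≤ pvWidth garden := by
    cases garden with
    | nil => exact absurd rfl hne
    | cons s t => simp [pvWidth, PySem.Str.len_eq]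
  -- the grid bound behind the fuel
  set B := ((garden.length : Int) - lo1).toNat * (pvWidth garden - lo2).toNat with hB
  have hBN : B + 1 ≤ N := by
    have h1 : ((garden.length : Int) - lo1).toNat ≤ garden.length + sr.natAbs := by omega
    have h2 : (pvWidth garden - lo2).toNat ≤ (pvWidth garden).toNat + sc.natAbs := by omega
    calc B + 1 ≤ (garden.length + sr.natAbs) * ((pvWidth garden).toNat + sc.natAbs) + 1 :=
          Nat.add_le_add_right (Nat.mul_le_mul h1 h2) 1
      _ ≤ N := by rw [hN]; nlinarith
  -- the initial state
  have hvis0 : PySem.Set.add PySem.Set.empty ((sr, sc) : Int × Int) = [(sr, sc)] := rfl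
  rw [hvis0]
  set F := pvFronts garden (N + 2) [(sr, sc)] [(sr, sc)] with hF
  set sizes := F.map (fun L => ((L.length : Int))) with hsizes
  have hnd0 : ([(sr, sc)] : List (Int × Int)).Nodup := List.nodup_singleton _
  have hgrid0 : ∀ c ∈ ([(sr, sc)] : List (Int × Int)), pvInGrid garden lo1 lo2 c := by
    intro c hc
    rw [List.mem_singleton] at hc
    subst hc
    exact ⟨min_le_left _ _, hr1, min_le_left _ _, hc1⟩
  -- ===== A's side: the loop builds pvC sizes =====
  have hA : pvLoopA garden (N + 2) [(sr, sc)] [(sr, sc)] [0, 0] = pvC sizes := by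
    rw [pv_loopA_char, hsizes, pvC, List.foldl_map]
  rw [hA, PySem.List.slice_from (pvC sizes) (by norm_num)]
  -- ===== B's side =====
  -- run the BFS: the final dict is exactly the levels tagged with their distances
  have hdoneF : pvDone garden (N + 2) [(sr, sc)] [(sr, sc)] :=
    pv_done_fuel garden hlo1 hlo2 (N + 2) _ _ hnd0 hgrid0 (fun x hx => hx) (by
      simp only [List.length_cons, List.length_nil]
      omega)
  have hsumF : pvSumLen F ≤ N := by
    have := pv_sumLen_fronts garden hlo1 hlo2 (N + 2) [] [(sr, sc)] (by simp)
      (by simpa using hgrid0)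
    simp only [List.length_nil, List.nil_append, Nat.zero_add] at this
    rw [← hF] at this
    omega
  have hsim := pv_sim garden (N + 2) [] [(sr, sc)]
    (PySem.Dict.insert PySem.Dict.empty (sr, sc) 0) 0
    (by rfl) (by simp)
    (by
      intro c hc
      rw [List.mem_singleton] at hc
      subst hc
      simp [PySem.Dict.getD_insert_self])
    (by simpa using hdoneF)
    (N + 1 - pvSumLen F)
  simp only [List.nil_append, List.length_nil] at hsim
  have hfuel : N + 1 = pvSumLen F + (N + 1 - pvSumLen F) := by omega
  rw [← hF, ← hfuel] at hsim
  rw [hsim]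
  -- fold the head level back in: dist0.items ++ tag (F.drop 1) 1 = tag F 0
  have hFcons : F = [(sr, sc)] :: pvFronts garden (N + 1)
      ([(sr, sc)] ++ pvExpand garden [(sr, sc)] [(sr, sc)]) (pvExpand garden [(sr, sc)] [(sr, sc)]) := by
    rw [hF, pvFronts, if_neg (by simp)]
  have hdistF : PySem.Dict.mk ((PySem.Dict.insert PySem.Dict.empty ((sr, sc) : Int × Int) 0).items
      ++ pvTag (F.drop 1) (0 + 1)) = PySem.Dict.mk (pvTag F 0) := by
    rw [hFcons]
    rfl
  rw [hdistF]
  -- values, counts, max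
  have hvals : (PySem.Dict.mk (pvTag F 0)).values = (pvTag F 0).map Prod.snd := rfl
  rw [hvals]
  have hFne : F ≠ [] := by rw [hFcons]; simp
  have hallne : ∀ L ∈ F, L ≠ [] := by
    intro L hL
    rw [hF] at hL
    exact pv_fronts_ne_nil garden _ _ _ L hL
  have hmax := pv_max_tag F 0 hFne hallne
  rw [hmax]
  have hmaxd : ((0 : Int) + F.length - 1 + 1) = ((F.length : Nat) : Int) := by omega
  simp only [Option.getD_some]
  rw [hmaxd]
  -- the counting pass is Counter(values)
  have hcounter : pvCounts ((pvTag F 0).map Prod.snd)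
      = PySem.Dict.counter ((pvTag F 0).map Prod.snd) :=
    PySem.Dict.foldl_insert_getD_add_one_eq_counter _
  rw [hcounter]
  -- histogram entries are the level sizes
  have hc : ∀ (k : Nat) (hk : k < sizes.length),
      (PySem.Dict.counter ((pvTag F 0).map Prod.snd)).getD (k : Int) 0 = sizes[k] := by
    intro k hk
    have hkF : k < F.length := by
      rw [hsizes] at hk
      simpa using hk
    rw [PySem.Dict.getD_counter]
    have h2 := pv_count_tag_at F 0 k hkF
    rw [zero_add] at h2
    rw [h2]
    simp [hsizes]
  have hcum := pv_cum _ sizes hc sizes.length (le_refl _)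
  rw [List.take_length] at hcum
  have hlensz : ((sizes.length : Nat) : Int) = ((F.length : Nat) : Int) := by
    rw [hsizes]
    simp
  rw [← hlensz, hcum]
  norm_num
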